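-- pv_equiv track=rewrite | github.com/datacemia/legal-ai-agent | backend/app/services/contract_agent/contract_agent.py | normalize_importance_score
-- ===== SOURCE A (Python) =====
-- def normalize_importance_score(
--     results: list[dict],
-- ) -> int:
--
--     risk_weights = {
--         "low": 0,
--         "medium": 8,
--         "high": 20,
--     }
--
--     materiality_weights = {
--         "low": 8,
--         "medium": 16,
--         "high": 24,
--     }
--
--     if not results:
--         return 0
--
--     total_risk_points = 0
--     total_materiality_points = 0
--
--     for item in results:
--
--         risk_level = item.get("risk_level", "low")
--         materiality_level = item.get(
--             "materiality_level",
--             "medium",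
--         )
--
--         total_risk_points += risk_weights.get(
--             risk_level,
--             0,
--         )
--
--         total_materiality_points += materiality_weights.get(
--             materiality_level,
--             16,
--         )
--
--     if total_materiality_points <= 0:
--         return 0
--
--     return round(
--         min(
--             100,
--             (
--                 total_risk_points
--                 / total_materiality_points
--             ) * 100,
--         )
--     )
-- ===== SOURCE B (Python) =====
-- def normalize_importance_score(
--     results: list[dict],
-- ) -> int:
--
--     risk_weights = {
--         "low": 0,
--         "medium": 8,
--         "high": 20,
--     }
--
--     materiality_weights = {
--         "low": 8,
--         "medium": 16,
--         "high": 24,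
--     }
--
--     # frequency tables over the resolved levels
--     risk_counts = {}
--     materiality_counts = {}
--     for item in results:
--         rl = item.get("risk_level", "low")
--         ml = item.get("materiality_level", "medium")
--         risk_counts[rl] = risk_counts.get(rl, 0) + 1
--         materiality_counts[ml] = materiality_counts.get(ml, 0) + 1
--
--     # dot products of the frequency tables with the weight tables
--     total_risk = sum(
--         risk_weights.get(lvl, 0) * cnt
--         for lvl, cnt in risk_counts.items()
--     )
--     total_materiality = sum(
--         materiality_weights.get(lvl, 16) * cnt
--         for lvl, cnt in materiality_counts.items()
--     )
--
--     # empty input yields zero totals, caught here (no separate guard needed)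
--     if total_materiality <= 0:
--         return 0
--
--     score = total_risk / total_materiality * 100
--     # cap at 100 before rounding (equivalent to round(min(100, score)))
--     if score >= 100:
--         return 100
--     return round(score)
-- ===== Notes on version B (the rewrite author's own statement) =====
-- stated objective: alternative
-- what changed: Per-item weight accumulation is replaced by frequency tables over the resolved risk/materiality levels whose totals are then dot products with the weight tables; the explicit empty-results guard is dropped (empty tables give a zero materiality total) and the final score is capped at 100 before rounding instead of rounding min(100, score).
import Mathlib
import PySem

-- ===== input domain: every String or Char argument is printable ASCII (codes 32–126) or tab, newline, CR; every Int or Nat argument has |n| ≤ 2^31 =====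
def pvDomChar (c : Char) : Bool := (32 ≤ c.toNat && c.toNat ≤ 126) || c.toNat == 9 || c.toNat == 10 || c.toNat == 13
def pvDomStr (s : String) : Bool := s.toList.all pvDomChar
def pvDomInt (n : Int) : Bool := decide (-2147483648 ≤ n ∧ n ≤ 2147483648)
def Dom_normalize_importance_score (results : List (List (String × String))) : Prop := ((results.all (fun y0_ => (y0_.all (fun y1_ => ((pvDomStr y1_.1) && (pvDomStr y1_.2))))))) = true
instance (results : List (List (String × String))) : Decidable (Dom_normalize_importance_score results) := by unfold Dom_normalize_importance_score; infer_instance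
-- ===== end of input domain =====

-- B replaces per-item weight accumulation by frequency tables over the resolved
-- levels and dot products with the weight tables, and caps at 100 before rounding
-- instead of rounding min(100, ·) (alternative decomposition, same cost).


-- ===== SHARED HELPERS (the Python primitives both programs call verbatim) =====

-- item.get(k, d): a Python dict argument is an association list; dict lookup with default.
def pvGetD (item : List (String × String)) (k d : String) : String :=
  (PySem.Dict.ofList item).getD k d

def pvRiskWeights : PySem.Dict String Int :=
  PySem.Dict.ofList [("low", 0), ("medium", 8), ("high", 20)]

def pvMaterialityWeights : PySem.Dict String Int :=
  PySem.Dict.ofList [("low", 8), ("medium", 16), ("high", 24)]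

-- ===== PORT A ===== (guard on empty list; one pass accumulating both weighted totals,
-- then round(min(100, r/m*100)) hand-ported: PySem has no floats, so the float tail
-- is modelled exactly — nearest-even division pvRneA, 53-bit normalization by upward
-- fuel search pvFindSA, dyadic nearest double pvFlA; validated against CPython.)

-- a/b rounded to nearest, ties to even (Python round on an exact half-integer grid).
def pvRneA (a b : Int) : Int :=
  let q := a / b
  let r := a % b
  if 2 * r < b then q else if b < 2 * r then q + 1 else if q % 2 = 0 then q else q + 1

-- least s with 2^52 * b ≤ a * 2^s, by upward fuel search.
def pvFindSA (a b : Int) : Nat → Nat → Nat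
  | 0, s => s
  | fuel + 1, s => if (2 ^ 52) * b ≤ a * (2 ^ s : Int) then s else pvFindSA a b fuel (s + 1)

-- nearest IEEE-754 double to a/b (0 ≤ a, 0 < b) as an exact dyadic rational (n, 2^s).
def pvFlA (a b : Int) : Int × Int :=
  if a = 0 then (0, 1)
  else
    let s := pvFindSA a b (64 + PySem.Int.bitLength a + PySem.Int.bitLength b) 0
    (pvRneA (a * 2 ^ s) b, 2 ^ s)

-- round(min(100, (r/m) * 100)) under CPython float semantics, for 0 ≤ r, 0 < m.
def pvScoreA (r m : Int) : Int :=
  let x := pvFlA r m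
  let y := pvFlA (x.1 * 100) x.2
  if 100 * y.2 ≤ y.1 then 100 else pvRneA y.1 y.2

def normalize_importance_score (results : List (List (String × String))) : Int :=
  if results = [] then 0
  else
    let t := results.foldl
      (fun (acc : Int × Int) item =>
        let risk_level := pvGetD item "risk_level" "low"
        let materiality_level := pvGetD item "materiality_level" "medium"
        (acc.1 + pvRiskWeights.getD risk_level 0,
         acc.2 + pvMaterialityWeights.getD materiality_level 16))
      (0, 0)
    if t.2 ≤ 0 then 0 else pvScoreA t.1 t.2

-- ===== PORT B ===== (frequency tables over the resolved levels, dot products with the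
-- weights, and the float tail 'cap at 100, else round' written in B's own form:
-- half-up division with an even-tie correction, 53-bit normalization by a range scan.)

-- a/b to nearest with ties to even, via round-half-up plus a parity correction on exact ties.
def pvRneB (a b : Int) : Int :=
  let q := (2 * a + b) / (2 * b)
  if (2 * a + b) % (2 * b) = 0 ∧ q % 2 = 1 then q - 1 else q

-- nearest IEEE-754 double to a/b as an exact dyadic rational: the shift is the first
-- s in range with 2^52 * b ≤ a * 2^s (same normal-range model as A's, scanned as a list).
def pvFlB (a b : Int) : Int × Int :=
  if a = 0 then (0, 1)
  else
    let n := 64 + PySem.Int.bitLength a + PySem.Int.bitLength b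
    let s := ((List.range n).find? (fun t => decide ((2 ^ 52) * b ≤ a * (2 ^ t : Int)))).getD n
    (pvRneB (a * 2 ^ s) b, 2 ^ s)

-- 'score >= 100 → 100, else round(score)' with score = the double nearest (r/m)*100.
def pvScoreB (r m : Int) : Int :=
  let x := pvFlB r m
  let y := pvFlB (x.1 * 100) x.2
  if y.1 < 100 * y.2 then pvRneB y.1 y.2 else 100

def normalize_importance_score_alt (results : List (List (String × String))) : Int :=
  let c := results.foldl
    (fun (p : PySem.Dict String Int × PySem.Dict String Int) item =>
      let rl := pvGetD item "risk_level" "low"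
      let ml := pvGetD item "materiality_level" "medium"
      (p.1.insert rl (p.1.getD rl 0 + 1),
       p.2.insert ml (p.2.getD ml 0 + 1)))
    (PySem.Dict.empty, PySem.Dict.empty)
  let total_risk := (c.1.items.map (fun p => pvRiskWeights.getD p.1 0 * p.2)).sum
  let total_materiality := (c.2.items.map (fun p => pvMaterialityWeights.getD p.1 16 * p.2)).sum
  if total_materiality ≤ 0 then 0 else pvScoreB total_risk total_materiality

-- ===== PRECONDITION & SPEC =====
def Spec_normalize_importance_score (results : List (List (String × String))) (out : Int) : Prop := out = normalize_importance_score_alt results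
instance (results : List (List (String × String))) (out : Int) : Decidable (Spec_normalize_importance_score results out) := by unfold Spec_normalize_importance_score; infer_instance

-- ===== CLAIM (what is proved, stated in full; the proofs are below) =====
def Claim_equal_normalize_importance_score : Prop := ∀ (results : List (List (String × String))), Dom_normalize_importance_score results → Spec_normalize_importance_score results (normalize_importance_score results)

-- ===== LEMMAS AND PROOFS =====

-- uniqueness of Euclidean quotient/remainder, positive divisor
theorem pvDivmod {a b q r : Int} (hb : 0 < b) (h : r + b * q = a) (h0 : 0 ≤ r) (h1 : r < b) :
    a / b = q ∧ a % b = r :=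
  (Int.ediv_emod_unique'' (by omega)).2 ⟨h, h0, by rwa [abs_of_pos hb]⟩

-- B's tie-corrected half-up rounding equals A's three-way nearest-even rounding (b > 0).
theorem pvRneB_eq (a b : Int) (hb : 0 < b) : pvRneB a b = pvRneA a b := by
  have hq := Int.mul_ediv_add_emod a b
  have hr0 := Int.emod_nonneg a (by omega : b ≠ 0)
  have hrb := Int.emod_lt_of_pos a hb
  unfold pvRneA pvRneB
  set q := a / b with hqd
  set r := a % b with hrd
  rcases lt_trichotomy (2 * r) b with h | h | h
  · obtain ⟨hd, hm⟩ := pvDivmod (a := 2*a+b) (b := 2*b) (q := q) (r := 2*r+b)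
      (by omega) (by linear_combination 2 * hq) (by omega) (by omega)
    simp only [hd, hm]
    split_ifs <;> omega
  · obtain ⟨hd, hm⟩ := pvDivmod (a := 2*a+b) (b := 2*b) (q := q + 1) (r := 0)
      (by omega) (by linear_combination 2 * hq - h) (by omega) (by omega)
    simp only [hd, hm, true_and]
    clear hq
    split_ifs <;> omega
  · obtain ⟨hd, hm⟩ := pvDivmod (a := 2*a+b) (b := 2*b) (q := q + 1) (r := 2*r-b)
      (by omega) (by linear_combination 2 * hq) (by omega) (by omega)
    simp only [hd, hm]
    split_ifs <;> omega

-- A's upward fuel search is first-hit on the corresponding range of shifts.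
theorem pvFindSA_eq_find? (a b : Int) : ∀ (fuel s : Nat),
    pvFindSA a b fuel s
      = (((List.range' s fuel).find? (fun t => decide ((2 ^ 52) * b ≤ a * (2 ^ t : Int)))).getD (s + fuel)) := by
  intro fuel
  induction fuel with
  | zero => intro s; simp [pvFindSA]
  | succ n ih =>
    intro s
    rw [List.range'_succ]
    unfold pvFindSA
    by_cases h : (2 ^ 52) * b ≤ a * (2 ^ s : Int)
    · rw [if_pos h, List.find?_cons_of_pos (by simpa using h)]
      rfl
    · rw [if_neg h, ih (s + 1), List.find?_cons_of_neg (by simpa using h)]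
      congr 1
      omega

theorem pvFlB_eq (a b : Int) (hb : 0 < b) : pvFlB a b = pvFlA a b := by
  unfold pvFlA pvFlB
  by_cases h : a = 0
  · simp [h]
  · simp only [h, if_false]
    rw [List.range_eq_range', pvFindSA_eq_find? a b _ 0]
    simp only [Nat.zero_add]
    rw [pvRneB_eq _ _ hb]

theorem pvFlA_snd_pos (a b : Int) : 0 < (pvFlA a b).2 := by
  unfold pvFlA
  split_ifs
  · norm_num
  · exact pow_pos (by norm_num) _

theorem pvScoreB_eq (r m : Int) (hm : 0 < m) : pvScoreB r m = pvScoreA r m := by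
  unfold pvScoreA pvScoreB
  dsimp only
  rw [pvFlB_eq r m hm, pvFlB_eq _ _ (pvFlA_snd_pos r m)]
  have hpos := pvFlA_snd_pos ((pvFlA r m).1 * 100) (pvFlA r m).2
  by_cases h : (pvFlA ((pvFlA r m).1 * 100) (pvFlA r m).2).1 < 100 * (pvFlA ((pvFlA r m).1 * 100) (pvFlA r m).2).2
  · rw [if_pos h, if_neg (by omega), pvRneB_eq _ _ hpos]
  · rw [if_neg h, if_pos (by omega)]

-- dot product of a Counter with a weight function = plain weighted sum over the list
theorem pv_counter_dot (xs : List String) (w : String → Int) :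
    (((PySem.Dict.counter xs).items).map (fun p => w p.1 * p.2)).sum = (xs.map w).sum := by
  rw [PySem.Dict.items_counter, List.map_map]
  have h1 : (xs.map w).sum = ∑ m ∈ xs.toFinset, xs.count m • w m := Finset.sum_list_map_count xs w
  have hnd := PySem.Set.nodup_ofList xs
  have h2 : ((PySem.Set.ofList xs).map ((fun p : String × Int => w p.1 * p.2) ∘ (fun k => (k, (xs.count k : Int))))).sum
      = ∑ m ∈ (PySem.Set.ofList xs : List String).toFinset, (w m * (xs.count m : Int)) := by
    rw [← List.sum_toFinset _ hnd]; rfl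
  have h3 : (PySem.Set.ofList xs : List String).toFinset = xs.toFinset := by
    ext y; simp [List.mem_toFinset, PySem.Set.mem_ofList]
  rw [h2, h3, h1]
  apply Finset.sum_congr rfl
  intro m _
  simp [mul_comm]

-- B's counting fold is Counter over the mapped levels
theorem pv_fold_counter (results : List (List (String × String))) (key dflt : String) :
    results.foldl (fun (d : PySem.Dict String Int) item =>
        d.insert (pvGetD item key dflt) (d.getD (pvGetD item key dflt) 0 + 1)) PySem.Dict.empty
      = PySem.Dict.counter (results.map (fun item => pvGetD item key dflt)) := by
  rw [← PySem.Dict.foldl_insert_getD_add_one_eq_counter, List.foldl_map]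

-- ===== VERDICT (by name: the statement is the Claim_ definition above) =====
theorem normalize_importance_score_spec : Claim_equal_normalize_importance_score := by
  intro results _
  show normalize_importance_score results = normalize_importance_score_alt results
  unfold normalize_importance_score normalize_importance_score_alt
  simp only []
  rw [PySem.List.foldl_prod_mk
        (fun (acc : Int) item => acc + pvRiskWeights.getD (pvGetD item "risk_level" "low") 0)
        (fun (acc : Int) item => acc + pvMaterialityWeights.getD (pvGetD item "materiality_level" "medium") 16),
      PySem.List.foldl_prod_mk
        (fun (d : PySem.Dict String Int) item =>
          d.insert (pvGetD item "risk_level" "low") (d.getD (pvGetD item "risk_level" "low") 0 + 1))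
        (fun (d : PySem.Dict String Int) item =>
          d.insert (pvGetD item "materiality_level" "medium") (d.getD (pvGetD item "materiality_level" "medium") 0 + 1))]
  dsimp only
  rw [pv_fold_counter, pv_fold_counter,
      pv_counter_dot _ (fun k => pvRiskWeights.getD k 0),
      pv_counter_dot _ (fun k => pvMaterialityWeights.getD k 16),
      List.map_map, List.map_map,
      PySem.List.foldl_add, PySem.List.foldl_add]
  rcases results with _ | ⟨x, xs⟩
  · decide
  · simp only [Function.comp_def, zero_add]
    rw [if_neg (by simp : ¬(x :: xs = []))]
    split_ifs with h2
    · rfl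
    · exact (pvScoreB_eq _ _ (by omega)).symm
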